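-- pv_equiv track=rewrite | github.com/PointyH/Advent-of-Code | 2024/Day_15.py | mod_map
-- ===== SOURCE A (Python) =====
-- def mod_map(warehouse):
--     replace = {'O':'[]','#':'##','@':'@.','.':'..'}
--     warehouse_new = []
--     for row in warehouse:
--         r = ''
--         for val in row:
--             r += replace[val]
--         warehouse_new.append(r)
--     warehouse = {(x,y): warehouse_new[y][x] for y in range(len(warehouse_new)) for x in range(len(warehouse_new[0]))}
--     return warehouse
-- ===== SOURCE B (Python) =====
-- def mod_map(warehouse):
--     # Single pass: write both doubled cells per source cell directly into the
--     # result dict, with no intermediate expanded-row strings. The column count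
--     # comes from the first row (as in the original).
--     replace = {'O': '[]', '#': '##', '@': '@.', '.': '..'}
--     width = len(warehouse[0]) if warehouse else 0
--     result = {}
--     for y, row in enumerate(warehouse):
--         for x in range(width):
--             a, b = replace[row[x]]
--             result[(2 * x, y)] = a
--             result[(2 * x + 1, y)] = b
--     return result
-- ===== Notes on version B (the rewrite author's own statement) =====
-- stated objective: simpler
-- what changed: B builds the coordinate dict in one direct pass (two cells written per source cell), eliminating A's intermediate doubled-string rows and its second coordinate-wise re-scan of them.
import Mathlib
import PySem

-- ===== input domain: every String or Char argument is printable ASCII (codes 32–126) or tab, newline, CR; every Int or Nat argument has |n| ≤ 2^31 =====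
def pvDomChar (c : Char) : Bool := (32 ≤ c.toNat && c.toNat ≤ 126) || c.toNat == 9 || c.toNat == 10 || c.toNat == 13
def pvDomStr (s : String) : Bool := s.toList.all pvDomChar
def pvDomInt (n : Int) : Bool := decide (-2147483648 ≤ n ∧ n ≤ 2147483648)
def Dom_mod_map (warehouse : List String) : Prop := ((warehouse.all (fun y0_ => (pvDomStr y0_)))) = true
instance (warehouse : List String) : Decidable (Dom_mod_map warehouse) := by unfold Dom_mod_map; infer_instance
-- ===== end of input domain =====

-- B fuses A's two phases (build doubled rows, then re-scan by coordinate) into one direct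
-- per-cell accumulation with no intermediate expanded strings (objective: simpler).

-- the replacement table {'O':'[]','#':'##','@':'@.','.':'..'} (values as List Char;
-- a Python 1-char string access row[x] is modelled as a Char, see the ports)
def pvReplace : PySem.Dict Char (List Char) :=
  ((((PySem.Dict.empty).insert 'O' ['[', ']']).insert '#' ['#', '#']).insert '@' ['@', '.']).insert '.' ['.', '.']

-- ===== PORT A =====
-- literal transliteration of A: first build the doubled rows, then the coordinate dict.
-- replace[val] raises KeyError for other chars (excluded by Pre_): getD [] is unreachable there.
-- warehouse_new[0] is only evaluated when the outer range is nonempty, so headD [] is exact.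
-- warehouse_new[y][x] raises IndexError when a doubled row is shorter than the first (excluded
-- by Pre_): getD ' ' is unreachable there. The comprehension's keys (x,y) are pairwise
-- distinct, so the dict is exactly the list of pairs in generation order (y outer, x inner).
def mod_map (warehouse : List String) : List (Int × Int × String) :=
  let warehouseNew : List (List Char) :=
    warehouse.foldl (fun acc row =>
      acc ++ [row.toList.foldl (fun r val => r ++ pvReplace.getD val []) []]) []
  (PySem.List.pyRange 0 (warehouseNew.length : Int) 1).foldl (fun d y =>
    (PySem.List.pyRange 0 ((warehouseNew.headD []).length : Int) 1).foldl (fun d x =>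
      d ++ [(x, y, String.mk [((PySem.List.pyGet? ((PySem.List.pyGet? warehouseNew y).getD []) x).getD ' ')])]) d) []

-- ===== PORT B =====
-- literal transliteration of B (Source B): one pass; width = len(warehouse[0]) if warehouse else 0;
-- for y,row in enumerate(warehouse): for x in range(width): a,b = replace[row[x]]; write both cells.
-- row[x] / replace[...] / the unpacking raise outside Pre_; the getD defaults are unreachable there.
def mod_map_alt (warehouse : List String) : List (Int × Int × String) :=
  let width : Nat := match warehouse with | [] => 0 | r :: _ => r.toList.length
  (PySem.List.enumerate warehouse).foldl (fun res yrow =>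
    (PySem.List.pyRange 0 (width : Int) 1).foldl (fun res x =>
      let pr := pvReplace.getD ((PySem.List.pyGet? yrow.2.toList x).getD ' ') []
      res ++ [(2 * x, yrow.1, String.mk [(PySem.List.pyGet? pr 0).getD ' ']),
              (2 * x + 1, yrow.1, String.mk [(PySem.List.pyGet? pr 1).getD ' '])]) res) []

-- ===== PRECONDITION & SPEC =====
-- Pre_ is exactly A's no-raise domain: every character is one of 'O' '#' '@' '.' (else A's
-- replace[val] raises KeyError) and no row is shorter than the first row (else A's
-- warehouse_new[y][x] raises IndexError at the width fixed from row 0).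
def Pre_mod_map (warehouse : List String) : Prop :=
  (warehouse.all (fun s => s.toList.all (fun c => c == 'O' || c == '#' || c == '@' || c == '.')) &&
   warehouse.all (fun s => decide ((warehouse.headD "").toList.length ≤ s.toList.length))) = true
instance (warehouse : List String) : Decidable (Pre_mod_map warehouse) := by
  unfold Pre_mod_map; infer_instance

def pvWitness_mod_map : List String := ["#O@.", "O..#O"]

def Spec_mod_map (warehouse : List String) (out : List (Int × Int × String)) : Prop := out = mod_map_alt warehouse
instance (warehouse : List String) (out : List (Int × Int × String)) : Decidable (Spec_mod_map warehouse out) := by unfold Spec_mod_map; infer_instance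

-- ===== CLAIM (what is proved, stated in full; the proofs are below) =====
def Claim_equal_mod_map : Prop := ∀ (warehouse : List String), Dom_mod_map warehouse → Pre_mod_map warehouse → Spec_mod_map warehouse (mod_map warehouse)

-- ===== LEMMAS AND PROOFS =====

-- 'c is one of the four map characters'
def pvValid (c : Char) : Prop := c = 'O' ∨ c = '#' ∨ c = '@' ∨ c = '.'

theorem pvReplace_len {c : Char} (h : pvValid c) : (pvReplace.getD c []).length = 2 := by
  rcases h with h | h | h | h <;> subst h <;> decide

-- length of a doubled row
theorem pvFlat_len (cs : List Char) (h : ∀ c ∈ cs, pvValid c) :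
    (cs.flatMap (fun c => pvReplace.getD c [])).length = 2 * cs.length := by
  induction cs with
  | nil => rfl
  | cons c t ih =>
    simp only [List.flatMap_cons, List.length_append, List.length_cons,
      pvReplace_len (h c (by simp)), ih (fun x hx => h x (by simp [hx]))]
    ring

-- indexing a doubled row: position 2*i+j comes from source cell i
theorem pvFlat_idx (cs : List Char) (h : ∀ c ∈ cs, pvValid c) (i j : Nat)
    (hi : i < cs.length) (hj : j < 2) :
    (cs.flatMap (fun c => pvReplace.getD c []))[2 * i + j]? =
      (pvReplace.getD (cs[i]?.getD ' ') [])[j]? := by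
  induction cs generalizing i with
  | nil => simp at hi
  | cons c t ih =>
    have hc : pvValid c := h c (by simp)
    have hlen : (pvReplace.getD c []).length = 2 := pvReplace_len hc
    cases i with
    | zero =>
      simp only [List.flatMap_cons]
      rw [List.getElem?_append_left (by omega)]
      simp
    | succ i' =>
      simp only [List.flatMap_cons]
      rw [List.getElem?_append_right (by omega)]
      have harith : 2 * (i' + 1) + j - (pvReplace.getD c []).length = 2 * i' + j := by omega
      rw [harith, ih (fun x hx => h x (by simp [hx])) i' (by simpa using hi)]
      simp

-- one row: A's re-scan of the doubled row at width 2*w0 equals B's direct two-cell emission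
theorem pvRow_eq (cs : List Char) (h : ∀ c ∈ cs, pvValid c) (y : Int) (w0 : Nat)
    (hw : w0 ≤ cs.length) :
    (List.range (2 * w0)).map (fun (k : Nat) =>
        ((k : Int), y, String.mk [(((cs.flatMap (fun c => pvReplace.getD c []))[k]?).getD ' ')]))
    = (List.range w0).flatMap (fun (i : Nat) =>
        [(2 * (i : Int), y, String.mk [(PySem.List.pyGet?
            (pvReplace.getD ((PySem.List.pyGet? cs (i : Int)).getD ' ') []) 0).getD ' ']),
         (2 * (i : Int) + 1, y, String.mk [(PySem.List.pyGet?
            (pvReplace.getD ((PySem.List.pyGet? cs (i : Int)).getD ' ') []) 1).getD ' '])]) := by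
  induction w0 with
  | zero => rfl
  | succ n ih =>
    have h2 : 2 * (n + 1) = 2 * n + 1 + 1 := by ring
    rw [h2, List.range_succ, List.range_succ, List.range_succ,
      List.map_append, List.map_append, List.flatMap_append, ih (by omega)]
    have hn : n < cs.length := by omega
    have hget : PySem.List.pyGet? cs (n : Int) = cs[n]? := by
      simp [PySem.List.pyGet?_natCast]
    obtain ⟨c, hc⟩ : ∃ c, cs[n]? = some c := ⟨cs[n], List.getElem?_eq_getElem hn⟩
    have hvc : pvValid c := h c (List.mem_of_getElem? hc)
    have e0 := pvFlat_idx cs h n 0 hn (by omega)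
    have e1 := pvFlat_idx cs h n 1 hn (by omega)
    simp only [List.append_assoc, List.map_cons, List.map_nil, List.flatMap_cons,
      List.flatMap_nil, List.append_nil, hget, hc]
    congr 1
    rw [show 2 * n + 0 = 2 * n by omega] at e0
    rcases hvc with h4 | h4 | h4 | h4 <;> subst h4 <;> simp_all <;> exact ⟨rfl, rfl⟩
  
-- enumerate as an index loop
theorem pvEnum_flatMap {α β : Type} (l : List α) (s : Int) (I : Int × α → List β) (d : α) :
    (PySem.List.enumerate l s).flatMap I
      = (List.range l.length).flatMap (fun (k : Nat) => I (s + (k : Int), l[k]?.getD d)) := by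
  induction l generalizing s with
  | nil => rfl
  | cons x t ih =>
    simp only [List.length_cons]
    rw [List.range_succ_eq_map]
    simp only [PySem.List.enumerate, List.flatMap_cons, ih (s + 1),
      List.flatMap_map]
    congr 1
    · simp
    · apply List.flatMap_congr  -- pointwise: shift the counter
      intro k hk
      have : s + ((k : Int) + 1) = s + 1 + (k : Int) := by ring
      push_cast
      rw [this]
      simp

-- ===== VERDICT helper: the main equality =====
theorem mod_map_eq_alt (warehouse : List String) (hpre : Pre_mod_map warehouse) :
    mod_map warehouse = mod_map_alt warehouse := by
  simp only [Pre_mod_map, Bool.and_eq_true, List.all_eq_true, Bool.or_eq_true, beq_iff_eq,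
    decide_eq_true_eq] at hpre
  obtain ⟨hval, hlen⟩ := hpre
  rcases warehouse with _ | ⟨r, rest⟩
  · rfl
  · have hvalr : ∀ c ∈ r.toList, pvValid c := fun c hc => by
      have := hval r (by simp) c hc; unfold pvValid; tauto
    have hW : (List.flatMap (fun c => pvReplace.getD c []) r.toList).length
        = 2 * r.toList.length := pvFlat_len _ hvalr
    simp only [mod_map, mod_map_alt, PySem.List.foldl_append_eq_flatMap, List.nil_append]
    rw [pvEnum_flatMap (r :: rest) 0 _ ""]
    have hmap : List.flatMap (fun s : String => [List.flatMap (fun c => pvReplace.getD c []) s.toList]) (r :: rest)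
        = (r :: rest).map (fun s => List.flatMap (fun c => pvReplace.getD c []) s.toList) :=
      (List.map_eq_flatMap).symm
    rw [hmap]
    simp only [List.map_cons, List.headD_cons]
    rw [hW]
    simp only [List.length_map, List.length_cons]
    simp only [PySem.List.pyRange_zero_natCast, List.flatMap_map]
    apply List.flatMap_congr
    intro k hk
    have hk' : k < (r :: rest).length := by simpa using hk
    have hs : (r :: rest)[k]? = some ((r :: rest)[k]) := List.getElem?_eq_getElem hk'
    have hvrow : ∀ c ∈ ((r :: rest)[k]).toList, pvValid c := fun c hc => by
      have := hval _ (List.getElem_mem hk') c hc; unfold pvValid; tauto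
    have hwrow : r.toList.length ≤ ((r :: rest)[k]).toList.length := by
      have := hlen _ (List.getElem_mem hk')
      simpa using this
    -- resolve the row lookup on A's side
    have hgetrow : (PySem.List.pyGet?
        (List.flatMap (fun c => pvReplace.getD c []) r.toList ::
          List.map (fun s => List.flatMap (fun c => pvReplace.getD c []) s.toList) rest) (k : Int)).getD []
        = List.flatMap (fun c => pvReplace.getD c []) ((r :: rest)[k]).toList := by
      rw [PySem.List.pyGet?_natCast,
        show (List.flatMap (fun c => pvReplace.getD c []) r.toList ::
            List.map (fun s => List.flatMap (fun c => pvReplace.getD c []) s.toList) rest)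
          = List.map (fun s => List.flatMap (fun c => pvReplace.getD c []) s.toList) (r :: rest) from rfl,
        List.getElem?_map, hs]
      rfl
    simp only [hgetrow, hs, Option.getD_some, zero_add]
    have hrow := pvRow_eq ((r :: rest)[k]).toList hvrow (k : Int) r.toList.length hwrow
    simp only [PySem.List.pyGet?_natCast] at hrow ⊢
    rw [← hrow]
    simp [List.map_eq_flatMap]

-- ===== VERDICT (by name: the statement is the Claim_ definition above) =====
theorem mod_map_spec : Claim_equal_mod_map := by
  intro warehouse _ hpre
  exact mod_map_eq_alt warehouse hpre
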